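-- pv_equiv track=rewrite | github.com/quirrelHK/DSA | Graphs/alien_dictionary.py | find_ordering
-- ===== SOURCE A (Python) =====
-- def topoSort(node,graph,vis,stack):
--     vis[node] = 1
--     for neighbour in graph[node]:
--         if not vis[neighbour]:
--             topoSort(neighbour,graph,vis,stack)
--
--     stack.append(node)
--
-- def find_ordering(k,n,sorted_dict):
--     graph =[[] for i in range(k)]
--
--     for i in range(n-1):
--         size = min(len(sorted_dict[i]),len(sorted_dict[i+1]))
--         for j in range(size):
--             if sorted_dict[i][j] != sorted_dict[i+1][j]:
--                 graph[ord(sorted_dict[i][j])-ord('a')].append(ord(sorted_dict[i+1][j]) - ord('a'))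
--                 break
--
--     vis = [0]*k
--     res = []
--     for i in range(k):
--         if not vis[i]:
--             topoSort(i,graph,vis,res)
--
--     return res[::-1]
-- ===== SOURCE B (Python) =====
-- def find_ordering(k, n, sorted_dict):
--     # build precedence edges from adjacent word pairs
--     p = max(n - 1, 0)
--     adj = [[] for _ in range(k)]
--     for w1, w2 in zip(sorted_dict[:p], sorted_dict[1:p + 1]):
--         for c1, c2 in zip(w1, w2):
--             if c1 != c2:
--                 adj[ord(c1) - 97].append(ord(c2) - 97)
--                 break
--     # iterative DFS with an explicit stack of (node, next-neighbour-index) frames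
--     state = [0] * k
--     order = []
--     for s in range(k):
--         if state[s]:
--             continue
--         state[s] = 1
--         stack = [(s, 0)]
--         while stack:
--             node, idx = stack[-1]
--             nbs = adj[node]
--             if idx < len(nbs):
--                 stack[-1] = (node, idx + 1)
--                 nb = nbs[idx]
--                 if not state[nb]:
--                     state[nb] = 1
--                     stack.append((nb, 0))
--             else:
--                 stack.pop()
--                 order.append(node)
--     order.reverse()
--     return order
-- ===== Notes on version B (the rewrite author's own statement) =====
-- stated objective: alternative
-- what changed: The recursive topoSort DFS is replaced by an iterative DFS driven by an explicit stack of (node, next-neighbour-index) frames producing the same reverse postorder, and adjacent word pairs are formed by zipping slices instead of range indexing.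
-- outside the precondition, e.g. on find_ordering(2, 2, ['`', 'a']): A returns [1, 0], B returns [1, 0]
import Mathlib
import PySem

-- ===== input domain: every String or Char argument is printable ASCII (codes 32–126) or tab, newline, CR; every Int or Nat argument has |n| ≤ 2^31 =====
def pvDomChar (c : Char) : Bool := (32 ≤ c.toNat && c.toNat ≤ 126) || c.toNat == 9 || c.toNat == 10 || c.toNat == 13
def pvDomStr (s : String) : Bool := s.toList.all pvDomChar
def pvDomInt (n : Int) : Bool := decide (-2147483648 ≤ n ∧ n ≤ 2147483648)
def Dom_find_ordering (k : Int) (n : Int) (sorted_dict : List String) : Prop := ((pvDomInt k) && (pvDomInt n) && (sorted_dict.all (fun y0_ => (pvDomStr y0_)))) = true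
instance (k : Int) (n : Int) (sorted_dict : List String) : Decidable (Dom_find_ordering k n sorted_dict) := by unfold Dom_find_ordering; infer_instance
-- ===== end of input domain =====

-- B replaces A's recursive depth-first topological sort by an iterative DFS over an explicit
-- stack of (node, next-neighbour-index) frames (same reverse postorder); objective: alternative
-- decomposition, same asymptotic cost. Only the RETURN value is compared (A mutates no argument).

-- ===== PORT A =====
-- graph[u].append(v); exact for the indices Pre_ admits (0 ≤ u < len(graph))
def pvAddEdgeA (g : List (List Int)) (u v : Int) : List (List Int) :=
  PySem.List.pySetD g u (PySem.List.pyGetD g u [] ++ [v])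

-- inner 'for j in range(size): if sorted_dict[i][j] != sorted_dict[i+1][j]: append edge; break'
def pvAInner (w1 w2 : List Char) (g : List (List Int)) : List Int → List (List Int)
  | [] => g
  | j :: js =>
    if PySem.List.pyGetD w1 j ' ' ≠ PySem.List.pyGetD w2 j ' ' then
      pvAddEdgeA g (((PySem.List.pyGetD w1 j ' ').toNat : Int) - 97)
                   (((PySem.List.pyGetD w2 j ' ').toNat : Int) - 97)
    else pvAInner w1 w2 g js

-- 'graph = [[] for i in range(k)]' then 'for i in range(n-1): …'
def pvABuild (k : Int) (n : Int) (l : List String) : List (List Int) :=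
  (PySem.List.pyRange 0 (n - 1) 1).foldl
    (fun g i =>
      let w1 := (PySem.List.pyGetD l i "").toList
      let w2 := (PySem.List.pyGetD l (i + 1) "").toList
      pvAInner w1 w2 g (PySem.List.pyRange 0 ((min w1.length w2.length : Nat) : Int) 1))
    (List.replicate k.toNat [])

-- the 'for neighbour in graph[node]: if not vis[neighbour]: topoSort(...)' loop, parametric in the recursive call
def pvVisitListA (rec : Int → List Int → List Int → Option (List Int × List Int)) :
    List Int → List Int → List Int → Option (List Int × List Int)
  | [], vis, res => some (vis, res)
  | nb :: nbs, vis, res =>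
    if PySem.List.pyGetD vis nb 0 = 0 then
      match rec nb vis res with
      | none => none
      | some p => pvVisitListA rec nbs p.1 p.2
    else pvVisitListA rec nbs vis res

-- topoSort(node, graph, vis, stack): vis[node] = 1; recurse into unvisited neighbours; stack.append(node).
-- The Nat argument is a fuel guard only (the Python recursion is bounded by the number of unvisited
-- nodes; under Pre_ the fuel passed below is never exhausted).
def pvVisitA (g : List (List Int)) : Nat → Int → List Int → List Int → Option (List Int × List Int)
  | 0, _, _, _ => none
  | f + 1, node, vis, res =>
    match pvVisitListA (pvVisitA g f) (PySem.List.pyGetD g node [])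
        (PySem.List.pySetD vis node 1) res with
    | none => none
    | some p => some (p.1, p.2 ++ [node])

-- 'vis = [0]*k; res = []; for i in range(k): if not vis[i]: topoSort(i, graph, vis, res)'
def pvALoop (graph : List (List Int)) (k : Int) : List Int × List Int :=
  (PySem.List.pyRange 0 k 1).foldl
    (fun (p : List Int × List Int) i =>
      if PySem.List.pyGetD p.1 i 0 = 0 then
        match pvVisitA graph (k.toNat + 1) i p.1 p.2 with
        | some q => q
        | none => p      -- fuel exhausted: unreachable under Pre_
      else p)
    (List.replicate k.toNat 0, [])

-- find_ordering: build graph, DFS from every unvisited i in range(k), return res[::-1]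
def find_ordering (k : Int) (n : Int) (sorted_dict : List String) : List Int :=
  (pvALoop (pvABuild k n sorted_dict) k).2.reverse   -- res[::-1] (PySem.List.slice?_none_none_neg_one)

-- ===== PORT B =====
-- adj[u].append(v)
def pvAddEdgeB (g : List (List Int)) (u v : Int) : List (List Int) :=
  PySem.List.pySetD g u (PySem.List.pyGetD g u [] ++ [v])

-- 'for c1, c2 in zip(w1, w2): if c1 != c2: append edge; break'
def pvBInner (g : List (List Int)) : List (Char × Char) → List (List Int)
  | [] => g
  | (c1, c2) :: rest =>
    if c1 ≠ c2 then pvAddEdgeB g ((c1.toNat : Int) - 97) ((c2.toNat : Int) - 97)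
    else pvBInner g rest

-- 'p = max(n-1, 0); for w1, w2 in zip(sorted_dict[:p], sorted_dict[1:p+1]): …'
def pvBBuild (k : Int) (n : Int) (l : List String) : List (List Int) :=
  ((PySem.List.slice l (some 0) (some (max (n - 1) 0))).zip
      (PySem.List.slice l (some 1) (some (max (n - 1) 0 + 1)))).foldl
    (fun adj ww => pvBInner adj (ww.1.toList.zip ww.2.toList))
    (List.replicate k.toNat [])

-- one iteration of the while-loop body; the stack top is the list head (Python appends at the end).
-- An empty stack is a fixed point ('while stack:' has exited).
def pvStep (adj : List (List Int)) :
    List (Int × Nat) × List Int × List Int → List (Int × Nat) × List Int × List Int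
  | ([], state, ord) => ([], state, ord)
  | ((node, idx) :: rest, state, ord) =>
    let nbs := PySem.List.pyGetD adj node []
    if h : idx < nbs.length then
      if PySem.List.pyGetD state nbs[idx] 0 = 0 then
        ((nbs[idx], 0) :: (node, idx + 1) :: rest, PySem.List.pySetD state nbs[idx] 1, ord)
      else ((node, idx + 1) :: rest, state, ord)
    else (rest, state, ord ++ [node])

-- 'while stack:' — iterate pvStep until the stack empties; the Nat is a fuel guard only
-- (under Pre_ the fuel passed below always suffices, see find_ordering_spec)
def pvRun (adj : List (List Int)) :
    Nat → List (Int × Nat) × List Int × List Int → List (Int × Nat) × List Int × List Int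
  | 0, c => c
  | f + 1, c => if c.1 = [] then c else pvRun adj f (pvStep adj c)

-- final (state, order) of a finished machine configuration
def pvDone (c : List (Int × Nat) × List Int × List Int) : List Int × List Int := (c.2.1, c.2.2)

-- 'state = [0]*k; order = []; for s in range(k): if not state[s]: state[s] = 1; run the machine from [(s, 0)]'
def pvBLoop (adj : List (List Int)) (k : Int) (fuel : Nat) : List Int × List Int :=
  (PySem.List.pyRange 0 k 1).foldl
    (fun (p : List Int × List Int) s =>
      if PySem.List.pyGetD p.1 s 0 ≠ 0 then p
      else pvDone (pvRun adj fuel ([(s, 0)], PySem.List.pySetD p.1 s 1, p.2)))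
    (List.replicate k.toNat 0, [])

def find_ordering_alt (k : Int) (n : Int) (sorted_dict : List String) : List Int :=
  (pvBLoop (pvBBuild k n sorted_dict) k
    ((k.toNat + 1) * (((pvBBuild k n sorted_dict).map List.length).sum + 2)
      + ((pvBBuild k n sorted_dict).map List.length).sum + 2)).2.reverse   -- order.reverse()

-- ===== PRECONDITION & SPEC =====
-- first position where the two words differ, with the two characters there
def pvFirstDiff : List Char → List Char → Option (Char × Char)
  | [], _ => none
  | _, [] => none
  | c1 :: w1, c2 :: w2 => if c1 ≠ c2 then some (c1, c2) else pvFirstDiff w1 w2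

def pvEdgeOK (k : Int) (p : Option (Char × Char)) : Bool :=
  match p with
  | none => true
  | some (c, d) => decide (97 ≤ (c.toNat : Int) ∧ (c.toNat : Int) < 97 + k ∧
                           97 ≤ (d.toNat : Int) ∧ (d.toNat : Int) < 97 + k)

-- Pre_ restricts to the problem's natural domain: n may not exceed len(sorted_dict) (beyond it A
-- raises IndexError), and at the first differing position of each adjacent word pair both characters
-- must be among the first k lowercase letters — outside that alphabet A either raises IndexError
-- (character above it) or wraps around via Python's negative list indexing (character below it),
-- neither of which is meaningful for an alien-dictionary instance.
def Pre_find_ordering (k : Int) (n : Int) (sorted_dict : List String) : Prop :=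
  (n ≤ sorted_dict.length ∨ n ≤ 1) ∧
  ∀ i : Nat, i < (n - 1).toNat →
    pvEdgeOK k (pvFirstDiff (sorted_dict.getD i "").toList
                            (sorted_dict.getD (i + 1) "").toList) = true

instance (k : Int) (n : Int) (sorted_dict : List String) : Decidable (Pre_find_ordering k n sorted_dict) := by
  unfold Pre_find_ordering; infer_instance

def pvWitness_find_ordering : Int × Int × List String := (3, 3, ["ab", "ac", "b"])

def Spec_find_ordering (k : Int) (n : Int) (sorted_dict : List String) (out : List Int) : Prop := out = find_ordering_alt k n sorted_dict
instance (k : Int) (n : Int) (sorted_dict : List String) (out : List Int) : Decidable (Spec_find_ordering k n sorted_dict out) := by unfold Spec_find_ordering; infer_instance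

-- ===== CLAIM (what is proved, stated in full; the proofs are below) =====
def Claim_equal_find_ordering : Prop := ∀ (k : Int) (n : Int) (sorted_dict : List String), Dom_find_ordering k n sorted_dict → Pre_find_ordering k n sorted_dict → Spec_find_ordering k n sorted_dict (find_ordering k n sorted_dict)

-- ===== LEMMAS AND PROOFS =====

-- apply (or not) the edge determined by a first differing pair of characters
def pvEdgeApply (g : List (List Int)) : Option (Char × Char) → List (List Int)
  | none => g
  | some (c, d) => pvAddEdgeA g ((c.toNat : Int) - 97) ((d.toNat : Int) - 97)

-- all adjacency-list entries name a vertex in [0, K)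
def pvInv (g : List (List Int)) (K : Nat) : Prop :=
  ∀ l ∈ g, ∀ x ∈ l, 0 ≤ x ∧ x < (K : Int)

-- counting unvisited cells
lemma pvCount_set (vis : List Int) (j : Nat) (hj : j < vis.length) (h0 : vis[j] = 0) :
    (vis.set j 1).count 0 + 1 = vis.count 0 := by
  induction vis generalizing j with
  | nil => simp at hj
  | cons a t ih =>
    cases j with
    | zero => simp_all
    | succ j =>
      simp only [List.length_cons, Nat.add_lt_add_iff_right] at hj
      simp only [List.getElem_cons_succ] at h0
      simp only [List.set_cons_succ, List.count_cons]
      have := ih j hj h0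
      omega

lemma pvGetD_mem_or_nil (g : List (List Int)) (i : Int) :
    PySem.List.pyGetD g i [] ∈ g ∨ PySem.List.pyGetD g i [] = ([] : List Int) := by
  have hdef : PySem.List.pyGetD g i [] = (PySem.List.pyGet? g i).getD [] := rfl
  cases h : PySem.List.pyGet? g i with
  | none => right; rw [hdef, h]; rfl
  | some l =>
    left; rw [hdef, h]
    exact PySem.List.mem_of_pyGet?_eq_some g h

lemma pvGetD_inv (g : List (List Int)) (K : Nat) (hg : pvInv g K) (i : Int) :
    ∀ x ∈ PySem.List.pyGetD g i [], 0 ≤ x ∧ x < (K : Int) := by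
  intro x hx
  rcases pvGetD_mem_or_nil g i with h | h
  · exact hg _ h x hx
  · rw [h] at hx; simp at hx

lemma pvGetD_len_le (g : List (List Int)) (i : Int) :
    (PySem.List.pyGetD g i []).length ≤ (g.map List.length).sum := by
  rcases pvGetD_mem_or_nil g i with h | h
  · exact List.le_sum_of_mem (List.mem_map_of_mem h)
  · rw [h]; simp


lemma pvAddEdgeB_eq (g : List (List Int)) (u v : Int) : pvAddEdgeB g u v = pvAddEdgeA g u v := rfl

lemma pvFirstDiff_nil_right (w : List Char) : pvFirstDiff w [] = none := by
  cases w <;> rfl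

lemma pvBInner_eq (w1 w2 : List Char) (g : List (List Int)) :
    pvBInner g (w1.zip w2) = pvEdgeApply g (pvFirstDiff w1 w2) := by
  induction w1 generalizing w2 with
  | nil => cases w2 <;> simp [pvBInner, pvFirstDiff, pvEdgeApply]
  | cons c1 t1 ih =>
    cases w2 with
    | nil => simp [pvBInner, pvFirstDiff_nil_right, pvEdgeApply]
    | cons c2 t2 =>
      by_cases h : c1 = c2
      · simpa [pvBInner, pvFirstDiff, h] using ih t2
      · simp [pvBInner, pvFirstDiff, h, pvEdgeApply, pvAddEdgeB_eq]

lemma pvAInner_eq (w1 w2 : List Char) :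
    ∀ (d j : Nat) (g : List (List Int)), min w1.length w2.length = j + d →
      pvAInner w1 w2 g (PySem.List.pyRange (j : Int) ((min w1.length w2.length : Nat) : Int) 1) =
        pvEdgeApply g (pvFirstDiff (w1.drop j) (w2.drop j)) := by
  intro d
  induction d with
  | zero =>
    intro j g hm
    have h1 : PySem.List.pyRange (j : Int) ((min w1.length w2.length : Nat) : Int) 1 = [] := by
      rw [PySem.List.pyRange_one]
      have : (((min w1.length w2.length : Nat) : Int) - j).toNat = 0 := by omega
      rw [this]; rfl
    rw [h1]
    have h2 : w1.length ≤ j ∨ w2.length ≤ j := by omega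
    rcases h2 with h | h
    · rw [List.drop_eq_nil_of_le h]
      simp [pvAInner, pvFirstDiff, pvEdgeApply]
    · rw [List.drop_eq_nil_of_le (as := w2) h, pvFirstDiff_nil_right]
      simp [pvAInner, pvEdgeApply]
  | succ d ih =>
    intro j g hm
    have hj1 : j < w1.length := by omega
    have hj2 : j < w2.length := by omega
    have hcons := PySem.List.pyRange_one_cons
      (a := (j : Int)) (b := ((min w1.length w2.length : Nat) : Int)) (by omega)
    rw [hcons]
    have g1 : PySem.List.pyGetD w1 (j : Int) ' ' = w1[j] := by
      rw [PySem.List.pyGetD_natCast]; exact List.getD_eq_getElem w1 ' ' hj1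
    have g2 : PySem.List.pyGetD w2 (j : Int) ' ' = w2[j] := by
      rw [PySem.List.pyGetD_natCast]; exact List.getD_eq_getElem w2 ' ' hj2
    rw [List.drop_eq_getElem_cons hj1, List.drop_eq_getElem_cons hj2]
    by_cases h : w1[j] = w2[j]
    · have hcast : (j : Int) + 1 = ((j + 1 : Nat) : Int) := by push_cast; ring
      rw [show pvAInner w1 w2 g ((j : Int) :: PySem.List.pyRange ((j : Int) + 1) ((min w1.length w2.length : Nat) : Int) 1)
            = pvAInner w1 w2 g (PySem.List.pyRange ((j : Int) + 1) ((min w1.length w2.length : Nat) : Int) 1) from by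
        simp [pvAInner, g1, g2, h]]
      rw [hcast, ih (j + 1) g (by omega)]
      simp [pvFirstDiff, h]
    · simp [pvAInner, g1, g2, h, pvFirstDiff, pvEdgeApply]

lemma pvZipTake {α β : Type} (a : List α) (b : List β) (n : Nat) :
    (a.take n).zip (b.take n) = (a.zip b).take n := by
  induction a generalizing b n with
  | nil => simp
  | cons x xs ih =>
    cases b with
    | nil => simp
    | cons y ys =>
      cases n with
      | zero => simp
      | succ n => simp [ih]

lemma pvBuild_aux (l : List String) (n : Int) (hlen : n ≤ l.length) (h1 : 1 < n) :
    ∀ (d j : Nat) (g : List (List Int)), (n - 1).toNat = j + d →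
      (PySem.List.pyRange (j : Int) (n - 1) 1).foldl
        (fun g i =>
          let w1 := (PySem.List.pyGetD l i "").toList
          let w2 := (PySem.List.pyGetD l (i + 1) "").toList
          pvAInner w1 w2 g (PySem.List.pyRange 0 ((min w1.length w2.length : Nat) : Int) 1)) g
      = (((l.zip l.tail).take (n - 1).toNat).drop j).foldl
          (fun adj ww => pvBInner adj (ww.1.toList.zip ww.2.toList)) g := by
  intro d
  induction d with
  | zero =>
    intro j g hm
    have h1' : PySem.List.pyRange (j : Int) (n - 1) 1 = [] := by
      rw [PySem.List.pyRange_one]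
      have : ((n - 1) - (j : Int)).toNat = 0 := by omega
      rw [this]; rfl
    have h2' : (((l.zip l.tail).take (n - 1).toNat).drop j) = [] := by
      apply List.drop_eq_nil_of_le
      rw [List.length_take]; omega
    rw [h1', h2']
    rfl
  | succ d ih =>
    intro j g hm
    have hjm : j < (n - 1).toNat := by omega
    have hjl : j + 1 < l.length := by omega
    have hjt : j < l.tail.length := by rw [List.length_tail]; omega
    rw [PySem.List.pyRange_one_cons (by omega : (j : Int) < n - 1)]
    have hlt : j < (((l.zip l.tail).take (n - 1).toNat)).length := by
      rw [List.length_take, List.length_zip, List.length_tail]; omega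
    rw [List.drop_eq_getElem_cons hlt]
    simp only [List.foldl_cons]
    have e1 : PySem.List.pyGetD l (j : Int) "" = l[j] := by
      rw [PySem.List.pyGetD_natCast]; exact List.getD_eq_getElem l "" (by omega)
    have e2 : PySem.List.pyGetD l ((j : Int) + 1) "" = l[j + 1] := by
      rw [show ((j : Int) + 1) = ((j + 1 : Nat) : Int) by push_cast; ring,
        PySem.List.pyGetD_natCast]
      exact List.getD_eq_getElem l "" hjl
    have e3 : (((l.zip l.tail).take (n - 1).toNat))[j]'hlt = (l[j], l[j + 1]) := by
      rw [List.getElem_take, List.getElem_zip]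
      congr 1
      exact List.getElem_tail _
    have hinner : ∀ (w1 w2 : List Char) (g' : List (List Int)),
        pvAInner w1 w2 g' (PySem.List.pyRange 0 ((min w1.length w2.length : Nat) : Int) 1)
          = pvEdgeApply g' (pvFirstDiff w1 w2) := by
      intro w1 w2 g'
      have := pvAInner_eq w1 w2 (min w1.length w2.length) 0 g' (by omega)
      simpa using this
    simp only [e1, e2, e3, hinner, pvBInner_eq]
    have hIH := ih (j + 1) (pvEdgeApply g (pvFirstDiff (l[j].toList) (l[j + 1].toList))) (by omega)
    simp only [hinner, pvBInner_eq] at hIH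
    rw [show ((j : Int) + 1) = ((j + 1 : Nat) : Int) by push_cast; ring]
    exact hIH

lemma pvBuild_eq (k n : Int) (l : List String) (hn : n ≤ l.length ∨ n ≤ 1) :
    pvABuild k n l = pvBBuild k n l := by
  unfold pvABuild pvBBuild
  by_cases h1 : n ≤ 1
  · have hr : PySem.List.pyRange 0 (n - 1) 1 = [] := by
      rw [PySem.List.pyRange_one]
      have : ((n - 1) - 0).toNat = 0 := by omega
      rw [this]; rfl
    have hmax : max (n - 1) 0 = 0 := by omega
    rw [hr, hmax]
    rw [PySem.List.slice_zero_start, PySem.List.slice_to l (by omega : (0:Int) ≤ 0)]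
    simp
  · push_neg at h1
    have hlen : n ≤ l.length := by
      rcases hn with h | h
      · exact h
      · omega
    have hmax : max (n - 1) 0 = n - 1 := by omega
    rw [hmax]
    have hp1 : PySem.List.slice l (some 0) (some (n - 1)) = l.take (n - 1).toNat := by
      rw [PySem.List.slice_zero_start, PySem.List.slice_to l (by omega : (0:Int) ≤ n - 1)]
    have hp2 : PySem.List.slice l (some 1) (some (n - 1 + 1)) = l.tail.take (n - 1).toNat := by
      rw [PySem.List.slice_toNat l (by omega : (0:Int) ≤ 1) (by omega : (0:Int) ≤ n - 1 + 1)]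
      rw [show Int.toNat 1 = 1 from rfl, List.drop_one]
      congr 1
      omega
    rw [hp1, hp2, pvZipTake]
    have := pvBuild_aux l n hlen h1 (n - 1).toNat 0 (List.replicate k.toNat []) (by omega)
    simp only [Nat.cast_zero, List.drop_zero] at this
    exact this

lemma pvEdgeApply_props (k : Int) (g : List (List Int)) (hg : pvInv g k.toNat)
    (o : Option (Char × Char)) (hok : pvEdgeOK k o = true) :
    pvInv (pvEdgeApply g o) k.toNat ∧ (pvEdgeApply g o).length = g.length := by
  cases o with
  | none => exact ⟨hg, rfl⟩
  | some cd =>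
    obtain ⟨c, dd⟩ := cd
    simp only [pvEdgeOK, decide_eq_true_eq] at hok
    obtain ⟨hc1, hc2, hd1, hd2⟩ := hok
    simp only [pvEdgeApply, pvAddEdgeA]
    rw [PySem.List.pySetD_of_nonneg g _ (by omega)]
    constructor
    · intro lst hlst x hx
      rcases List.mem_or_eq_of_mem_set hlst with hmem | heq
      · exact hg lst hmem x hx
      · subst heq
        rcases List.mem_append.mp hx with hold | hnew
        · exact pvGetD_inv g k.toNat hg _ x hold
        · have : x = (dd.toNat : Int) - 97 := List.mem_singleton.mp hnew
          subst this
          constructor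
          · omega
          · omega
    · rw [List.length_set]

lemma pvABuild_aux (k n : Int) (l : List String)
    (hpre2 : ∀ i : Nat, i < (n - 1).toNat →
      pvEdgeOK k (pvFirstDiff (l.getD i "").toList (l.getD (i + 1) "").toList) = true) :
    ∀ (d j : Nat) (g : List (List Int)), (n - 1).toNat = j + d →
      pvInv g k.toNat → g.length = k.toNat →
      pvInv ((PySem.List.pyRange (j : Int) (n - 1) 1).foldl
        (fun g i =>
          let w1 := (PySem.List.pyGetD l i "").toList
          let w2 := (PySem.List.pyGetD l (i + 1) "").toList
          pvAInner w1 w2 g (PySem.List.pyRange 0 ((min w1.length w2.length : Nat) : Int) 1)) g) k.toNat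
      ∧ ((PySem.List.pyRange (j : Int) (n - 1) 1).foldl
        (fun g i =>
          let w1 := (PySem.List.pyGetD l i "").toList
          let w2 := (PySem.List.pyGetD l (i + 1) "").toList
          pvAInner w1 w2 g (PySem.List.pyRange 0 ((min w1.length w2.length : Nat) : Int) 1)) g).length = k.toNat := by
  intro d
  induction d with
  | zero =>
    intro j g hm hg hlen
    have h1' : PySem.List.pyRange (j : Int) (n - 1) 1 = [] := by
      rw [PySem.List.pyRange_one]
      have : ((n - 1) - (j : Int)).toNat = 0 := by omega
      rw [this]; rfl
    rw [h1']
    exact ⟨hg, hlen⟩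
  | succ d ih =>
    intro j g hm hg hlen
    rw [PySem.List.pyRange_one_cons (by omega : (j : Int) < n - 1)]
    simp only [List.foldl_cons]
    have e1 : PySem.List.pyGetD l (j : Int) "" = l.getD j "" := PySem.List.pyGetD_natCast l j ""
    have e2 : PySem.List.pyGetD l ((j : Int) + 1) "" = l.getD (j + 1) "" := by
      rw [show ((j : Int) + 1) = ((j + 1 : Nat) : Int) by push_cast; ring]
      exact PySem.List.pyGetD_natCast l (j + 1) ""
    have hinner : ∀ (w1 w2 : List Char) (g' : List (List Int)),
        pvAInner w1 w2 g' (PySem.List.pyRange 0 ((min w1.length w2.length : Nat) : Int) 1)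
          = pvEdgeApply g' (pvFirstDiff w1 w2) := by
      intro w1 w2 g'
      have := pvAInner_eq w1 w2 (min w1.length w2.length) 0 g' (by omega)
      simpa using this
    simp only [e1, e2, hinner]
    obtain ⟨hg', hlen'⟩ := pvEdgeApply_props k g hg _ (hpre2 j (by omega))
    have hIH := ih (j + 1) (pvEdgeApply g
      (pvFirstDiff (l.getD j "").toList (l.getD (j + 1) "").toList)) (by omega) hg' (by omega)
    simp only [hinner] at hIH
    rw [show ((j : Int) + 1) = ((j + 1 : Nat) : Int) by push_cast; ring]
    exact hIH

lemma pvABuild_inv (k n : Int) (l : List String) (hpre : Pre_find_ordering k n l) :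
    pvInv (pvABuild k n l) k.toNat ∧ (pvABuild k n l).length = k.toNat := by
  unfold pvABuild
  have h0inv : pvInv (List.replicate k.toNat ([] : List Int)) k.toNat := by
    intro lst hlst x hx
    rw [List.eq_of_mem_replicate hlst] at hx
    simp at hx
  have := pvABuild_aux k n l hpre.2 (n - 1).toNat 0 (List.replicate k.toNat [])
    (by omega) h0inv (by simp)
  simp only [Nat.cast_zero] at this
  exact this

lemma pvVisitListA_props (g : List (List Int)) (K : Nat) (_hg : pvInv g K) (f : Nat)
    (hf : ∀ node vis res v r, vis.length = K → 0 ≤ node → node < (K : Int) →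
      PySem.List.pyGetD vis node 0 = 0 → pvVisitA g f node vis res = some (v, r) →
      v.length = K ∧ v.count 0 < vis.count 0) :
    ∀ nbs vis res v r, vis.length = K → (∀ x ∈ nbs, 0 ≤ x ∧ x < (K : Int)) →
      pvVisitListA (pvVisitA g f) nbs vis res = some (v, r) →
      v.length = K ∧ v.count 0 ≤ vis.count 0 := by
  intro nbs
  induction nbs with
  | nil =>
    intro vis res v r hlen _ h
    simp only [pvVisitListA] at h
    simp only [Option.some.injEq, Prod.mk.injEq] at h
    obtain ⟨h1, h2⟩ := h
    subst h1; exact ⟨hlen, le_refl _⟩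
  | cons nb nbs ih =>
    intro vis res v r hlen hrange h
    simp only [pvVisitListA] at h
    by_cases hguard : PySem.List.pyGetD vis nb 0 = 0
    · rw [if_pos hguard] at h
      cases hrec : pvVisitA g f nb vis res with
      | none => rw [hrec] at h; exact absurd h (by simp)
      | some p =>
        rw [hrec] at h
        obtain ⟨hnb1, hnb2⟩ := hrange nb (List.mem_cons_self ..)
        obtain ⟨hl1, hc1⟩ := hf nb vis res p.1 p.2 hlen hnb1 hnb2 hguard (by rw [hrec])
        obtain ⟨hl2, hc2⟩ := ih p.1 p.2 v r hl1 (fun x hx => hrange x (List.mem_cons_of_mem _ hx)) h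
        exact ⟨hl2, by omega⟩
    · rw [if_neg hguard] at h
      exact ih vis res v r hlen (fun x hx => hrange x (List.mem_cons_of_mem _ hx)) h


-- properties of a successful A-side visit: length preserved, unvisited count decreases
lemma pvVisitA_props (g : List (List Int)) (K : Nat) (hg : pvInv g K) :
    ∀ f node vis res v r, vis.length = K → 0 ≤ node → node < (K : Int) →
      PySem.List.pyGetD vis node 0 = 0 →
      pvVisitA g f node vis res = some (v, r) →
      v.length = K ∧ v.count 0 < vis.count 0 := by
  intro f
  induction f with
  | zero => intro node vis res v r _ _ _ _ h; exact absurd h (by simp [pvVisitA])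
  | succ f ih =>
    intro node vis res v r hlen hn0 hnK hguard h
    simp only [pvVisitA] at h
    cases hin : pvVisitListA (pvVisitA g f) (PySem.List.pyGetD g node [])
        (PySem.List.pySetD vis node 1) res with
    | none => rw [hin] at h; exact absurd h (by simp)
    | some p =>
      rw [hin] at h
      simp only [Option.some.injEq, Prod.mk.injEq] at h
      obtain ⟨h1, h2⟩ := h
      have hset : PySem.List.pySetD vis node 1 = vis.set node.toNat 1 :=
        PySem.List.pySetD_of_nonneg vis 1 hn0
      have hnlt : node.toNat < vis.length := by omega
      have hval : vis[node.toNat] = 0 := by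
        have := PySem.List.pyGetD_eq_getElem (xs := vis) (d := (0 : Int)) hn0 (by omega)
        rw [this] at hguard; exact hguard
      have hcnt := pvCount_set vis node.toNat hnlt hval
      have hlen1 : (PySem.List.pySetD vis node 1).length = K := by
        rw [hset, List.length_set, hlen]
      obtain ⟨hl, hc⟩ := pvVisitListA_props g K hg f ih (PySem.List.pyGetD g node [])
        (PySem.List.pySetD vis node 1) res p.1 p.2 hlen1 (pvGetD_inv g K hg node) hin
      rw [hset] at hc
      subst h1
      exact ⟨hl, by omega⟩

lemma pvVisitListA_suff (g : List (List Int)) (K : Nat) (hg : pvInv g K) (f : Nat)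
    (hsuff : ∀ node vis res, vis.length = K → 0 ≤ node → node < (K : Int) →
      PySem.List.pyGetD vis node 0 = 0 → vis.count 0 ≤ f →
      ∃ v r, pvVisitA g f node vis res = some (v, r)) :
    ∀ nbs vis res, vis.length = K → (∀ x ∈ nbs, 0 ≤ x ∧ x < (K : Int)) → vis.count 0 ≤ f →
      ∃ v r, pvVisitListA (pvVisitA g f) nbs vis res = some (v, r) := by
  intro nbs
  induction nbs with
  | nil => intro vis res _ _ _; exact ⟨vis, res, rfl⟩
  | cons nb nbs ih =>
    intro vis res hlen hrange hcnt
    by_cases hguard : PySem.List.pyGetD vis nb 0 = 0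
    · obtain ⟨hnb1, hnb2⟩ := hrange nb (List.mem_cons_self ..)
      obtain ⟨v1, r1, hrec⟩ := hsuff nb vis res hlen hnb1 hnb2 hguard hcnt
      obtain ⟨hl1, hc1⟩ := pvVisitA_props g K hg f nb vis res v1 r1 hlen hnb1 hnb2 hguard hrec
      obtain ⟨v, r, hrest⟩ := ih v1 r1 hl1
        (fun x hx => hrange x (List.mem_cons_of_mem _ hx)) (by omega)
      refine ⟨v, r, ?_⟩
      simp only [pvVisitListA]
      rw [if_pos hguard, hrec]
      exact hrest
    · obtain ⟨v, r, hrest⟩ := ih vis res hlen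
        (fun x hx => hrange x (List.mem_cons_of_mem _ hx)) hcnt
      refine ⟨v, r, ?_⟩
      simp only [pvVisitListA]
      rw [if_neg hguard]
      exact hrest

-- sufficiency of the fuel: a visit of an unvisited node succeeds when fuel ≥ #unvisited
lemma pvVisitA_suff (g : List (List Int)) (K : Nat) (hg : pvInv g K) :
    ∀ f node vis res, vis.length = K → 0 ≤ node → node < (K : Int) →
      PySem.List.pyGetD vis node 0 = 0 → vis.count 0 ≤ f →
      ∃ v r, pvVisitA g f node vis res = some (v, r) := by
  intro f
  induction f with
  | zero =>
    intro node vis res hlen hn0 hnK hguard hcnt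
    exfalso
    have hval : vis[node.toNat] = 0 := by
      have := PySem.List.pyGetD_eq_getElem vis (0 : Int) hn0 (by omega)
      rw [this] at hguard; exact hguard
    have hmem : (0 : Int) ∈ vis := hval ▸ vis.getElem_mem (by omega)
    have := List.count_pos_iff.mpr hmem
    omega
  | succ f ih =>
    intro node vis res hlen hn0 hnK hguard hcnt
    have hset : PySem.List.pySetD vis node 1 = vis.set node.toNat 1 :=
      PySem.List.pySetD_of_nonneg vis 1 hn0
    have hval : vis[node.toNat] = 0 := by
      have := PySem.List.pyGetD_eq_getElem vis (0 : Int) hn0 (by omega)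
      rw [this] at hguard; exact hguard
    have hcnt1 := pvCount_set vis node.toNat (by omega) hval
    obtain ⟨v, r, hin⟩ := pvVisitListA_suff g K hg f ih (PySem.List.pyGetD g node [])
      (PySem.List.pySetD vis node 1) res
      (by rw [hset, List.length_set, hlen]) (pvGetD_inv g K hg node)
      (by rw [hset]; omega)
    refine ⟨v, r ++ [node], ?_⟩
    simp only [pvVisitA]
    rw [hin]

lemma pvStep_fix (adj : List (List Int)) (c) (h : c.1 = []) : pvStep adj c = c := by
  obtain ⟨st, state, ord⟩ := c
  simp only at h
  subst h
  rfl

lemma pvRun_of_steps (adj : List (List Int)) :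
    ∀ m (c c' : List (Int × Nat) × List Int × List Int), (pvStep adj)^[m] c = c' → c'.1 = [] →
      ∀ f, m ≤ f → pvRun adj f c = c' := by
  intro m
  induction m with
  | zero =>
    intro c c' h he f _
    simp only [Function.iterate_zero, id] at h
    subst h
    cases f with
    | zero => rfl
    | succ f => simp only [pvRun, if_pos he]
  | succ m ih =>
    intro c c' h he f hf
    cases f with
    | zero => omega
    | succ f =>
      by_cases hc : c.1 = []
      · have hfix := pvStep_fix adj c hc
        have hc' : c' = c := by
          rw [← h, Function.iterate_fixed hfix]
        subst hc'
        simp only [pvRun, if_pos hc]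
      · simp only [pvRun, if_neg hc]
        exact ih (pvStep adj c) c' (by rwa [Function.iterate_succ_apply] at h) he f (by omega)

-- the simulation: the explicit-stack machine replays a successful recursive visit step for step
lemma pvSim (g : List (List Int)) (K E : Nat) (hg : pvInv g K)
    (hE : ∀ i : Int, (PySem.List.pyGetD g i []).length ≤ E) :
    ∀ f pend (node : Int) (idx : Nat) vis res v r rest,
      vis.length = K → pend = (PySem.List.pyGetD g node []).drop idx →
      pvVisitListA (pvVisitA g f) pend vis res = some (v, r) →
      ∃ m, (pvStep g)^[m] ((node, idx) :: rest, vis, res) = (rest, v, r ++ [node]) ∧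
        m ≤ (vis.count 0 - v.count 0) * (E + 2) + pend.length + 1 := by
  intro f
  induction f with
  | zero =>
    intro pend
    induction pend with
    | nil =>
      intro node idx vis res v r rest hlen hpend h
      have hge : (PySem.List.pyGetD g node []).length ≤ idx := by
        have hl := congrArg List.length hpend
        simp only [List.length_drop, List.length_nil] at hl
        omega
      simp only [pvVisitListA, Option.some.injEq, Prod.mk.injEq] at h
      obtain ⟨h1, h2⟩ := h
      subst h1; subst h2
      refine ⟨1, ?_, by simp⟩
      rw [Function.iterate_one]
      simp only [pvStep]
      rw [dif_neg (by omega)]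
    | cons nb pend' ihp =>
      intro node idx vis res v r rest hlen hpend h
      have hidx : idx < (PySem.List.pyGetD g node []).length := by
        by_contra hge
        push_neg at hge
        rw [List.drop_eq_nil_of_le hge] at hpend
        simp at hpend
      rw [List.drop_eq_getElem_cons hidx] at hpend
      injection hpend with hnb hpend'
      simp only [pvVisitListA] at h
      by_cases hguard : PySem.List.pyGetD vis nb 0 = 0
      · rw [if_pos hguard] at h
        rw [show pvVisitA g 0 nb vis res = none from rfl] at h
        simp at h
      · rw [if_neg hguard] at h
        obtain ⟨m2, hm2, hb2⟩ := ihp node (idx + 1) vis res v r rest hlen hpend' h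
        refine ⟨m2 + 1, ?_, ?_⟩
        · rw [Function.iterate_add_apply, Function.iterate_one]
          have hstep : pvStep g ((node, idx) :: rest, vis, res)
              = ((node, idx + 1) :: rest, vis, res) := by
            simp only [pvStep]
            rw [dif_pos hidx, ← hnb, if_neg hguard]
          rw [hstep, hm2]
        · simp only [List.length_cons]; omega
  | succ f ihf =>
    intro pend
    induction pend with
    | nil =>
      intro node idx vis res v r rest hlen hpend h
      have hge : (PySem.List.pyGetD g node []).length ≤ idx := by
        have hl := congrArg List.length hpend
        simp only [List.length_drop, List.length_nil] at hl
        omega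
      simp only [pvVisitListA, Option.some.injEq, Prod.mk.injEq] at h
      obtain ⟨h1, h2⟩ := h
      subst h1; subst h2
      refine ⟨1, ?_, by simp⟩
      rw [Function.iterate_one]
      simp only [pvStep]
      rw [dif_neg (by omega)]
    | cons nb pend' ihp =>
      intro node idx vis res v r rest hlen hpend h
      have hidx : idx < (PySem.List.pyGetD g node []).length := by
        by_contra hge
        push_neg at hge
        rw [List.drop_eq_nil_of_le hge] at hpend
        simp at hpend
      rw [List.drop_eq_getElem_cons hidx] at hpend
      injection hpend with hnb hpend'
      have hnbmem : nb ∈ PySem.List.pyGetD g node [] := by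
        rw [hnb]; exact List.getElem_mem hidx
      obtain ⟨hnb0, hnbK⟩ := pvGetD_inv g K hg node nb hnbmem
      simp only [pvVisitListA] at h
      by_cases hguard : PySem.List.pyGetD vis nb 0 = 0
      · rw [if_pos hguard] at h
        cases hrec : pvVisitA g (f + 1) nb vis res with
        | none => rw [hrec] at h; simp at h
        | some p =>
          obtain ⟨p1, p2⟩ := p
          rw [hrec] at h
          have hrec' := hrec
          simp only [pvVisitA] at hrec'
          cases hin : pvVisitListA (pvVisitA g f) (PySem.List.pyGetD g nb [])
              (PySem.List.pySetD vis nb 1) res with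
          | none => rw [hin] at hrec'; simp at hrec'
          | some q =>
            rw [hin] at hrec'
            simp only [Option.some.injEq, Prod.mk.injEq] at hrec'
            obtain ⟨hq1, hq2⟩ := hrec'
            have hset : PySem.List.pySetD vis nb 1 = vis.set nb.toNat 1 :=
              PySem.List.pySetD_of_nonneg vis 1 hnb0
            have hval : vis[nb.toNat] = 0 := by
              have := PySem.List.pyGetD_eq_getElem vis (0 : Int) hnb0 (by omega)
              rw [this] at hguard; exact hguard
            have hcnt1 := pvCount_set vis nb.toNat (by omega) hval
            have hlen1 : (PySem.List.pySetD vis nb 1).length = K := by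
              rw [hset, List.length_set, hlen]
            obtain ⟨hlq, hcq⟩ := pvVisitListA_props g K hg f (pvVisitA_props g K hg f)
              (PySem.List.pyGetD g nb []) (PySem.List.pySetD vis nb 1) res q.1 q.2 hlen1
              (pvGetD_inv g K hg nb) hin
            obtain ⟨m1, hm1, hb1⟩ := ihf (PySem.List.pyGetD g nb []) nb 0
              (PySem.List.pySetD vis nb 1) res q.1 q.2 ((node, idx + 1) :: rest) hlen1
              (by simp) hin
            have hcont : pvVisitListA (pvVisitA g (f + 1)) pend' q.1 (q.2 ++ [nb])
                = some (v, r) := by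
              rw [hq1, hq2]; exact h
            obtain ⟨m2, hm2, hb2⟩ := ihp node (idx + 1) q.1 (q.2 ++ [nb]) v r rest hlq hpend' hcont
            obtain ⟨hlv, hcv⟩ := pvVisitListA_props g K hg (f + 1) (pvVisitA_props g K hg (f + 1))
              pend' q.1 (q.2 ++ [nb]) v r hlq
              (fun x hx => pvGetD_inv g K hg node x (List.mem_of_mem_drop (hpend' ▸ hx))) hcont
            refine ⟨m2 + (m1 + 1), ?_, ?_⟩
            · have hstep : pvStep g ((node, idx) :: rest, vis, res)
                  = ((nb, 0) :: (node, idx + 1) :: rest, PySem.List.pySetD vis nb 1, res) := by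
                simp only [pvStep]
                rw [dif_pos hidx, ← hnb, if_pos hguard]
              rw [Function.iterate_add_apply, Function.iterate_add_apply, Function.iterate_one,
                hstep, hm1, hm2]
            · have hEnb : (PySem.List.pyGetD g nb []).length ≤ E := hE nb
              rw [hset] at hb1 hcq
              have hkey : ((vis.set nb.toNat 1).count 0 - q.1.count 0) * (E + 2)
                  + (q.1.count 0 - v.count 0) * (E + 2) + (E + 2)
                  = (vis.count 0 - v.count 0) * (E + 2) := by
                rw [← Nat.add_mul, ← Nat.succ_mul]
                congr 1
                omega
              simp only [List.length_cons]
              omega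
      · rw [if_neg hguard] at h
        obtain ⟨m2, hm2, hb2⟩ := ihp node (idx + 1) vis res v r rest hlen hpend' h
        refine ⟨m2 + 1, ?_, ?_⟩
        · rw [Function.iterate_add_apply, Function.iterate_one]
          have hstep : pvStep g ((node, idx) :: rest, vis, res)
              = ((node, idx + 1) :: rest, vis, res) := by
            simp only [pvStep]
            rw [dif_pos hidx, ← hnb, if_neg hguard]
          rw [hstep, hm2]
        · simp only [List.length_cons]; omega

-- the two main loops agree step for step
lemma pvMainLoop (g : List (List Int)) (K E fuel : Nat) (k : Int) (hg : pvInv g K)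
    (hK : K = k.toNat)
    (hE : ∀ i : Int, (PySem.List.pyGetD g i []).length ≤ E)
    (hfuel : K * (E + 2) + E + 2 ≤ fuel) :
    ∀ (d : Nat) (j : Int) (vis res), 0 ≤ j → (k - j).toNat = d → vis.length = K →
      (PySem.List.pyRange j k 1).foldl
        (fun (p : List Int × List Int) i =>
          if PySem.List.pyGetD p.1 i 0 = 0 then
            match pvVisitA g (k.toNat + 1) i p.1 p.2 with
            | some q => q
            | none => p
          else p) (vis, res)
      = (PySem.List.pyRange j k 1).foldl
        (fun (p : List Int × List Int) s =>
          if PySem.List.pyGetD p.1 s 0 ≠ 0 then p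
          else pvDone (pvRun g fuel ([(s, 0)], PySem.List.pySetD p.1 s 1, p.2))) (vis, res) := by
  intro d
  induction d with
  | zero =>
    intro j vis res hj hd hlen
    have hr : PySem.List.pyRange j k 1 = [] := by
      rw [PySem.List.pyRange_one, hd]; rfl
    rw [hr]
    rfl
  | succ d ih =>
    intro j vis res hj hd hlen
    have hjk : j < k := by omega
    rw [PySem.List.pyRange_one_cons hjk]
    simp only [List.foldl_cons]
    by_cases hguard : PySem.List.pyGetD vis j 0 = 0
    · have hjK : j < (K : Int) := by omega
      obtain ⟨v, r, hvr⟩ := pvVisitA_suff g K hg (k.toNat + 1) j vis res hlen hj hjK hguard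
        (by have := List.count_le_length (a := (0 : Int)) (l := vis); omega)
      have hvr' := hvr
      simp only [pvVisitA] at hvr'
      cases hin : pvVisitListA (pvVisitA g k.toNat) (PySem.List.pyGetD g j [])
          (PySem.List.pySetD vis j 1) res with
      | none => rw [hin] at hvr'; simp at hvr'
      | some p =>
        obtain ⟨p1, p2⟩ := p
        rw [hin] at hvr'
        simp only [Option.some.injEq, Prod.mk.injEq] at hvr'
        obtain ⟨hp1, hp2⟩ := hvr'
        have hlen1 : (PySem.List.pySetD vis j 1).length = K := by
          rw [PySem.List.pySetD_of_nonneg vis 1 hj, List.length_set, hlen]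
        obtain ⟨hlp, hcp⟩ := pvVisitListA_props g K hg k.toNat (pvVisitA_props g K hg k.toNat)
          (PySem.List.pyGetD g j []) (PySem.List.pySetD vis j 1) res p1 p2 hlen1
          (pvGetD_inv g K hg j) hin
        obtain ⟨m, hm, hb⟩ := pvSim g K E hg hE k.toNat (PySem.List.pyGetD g j []) j 0
          (PySem.List.pySetD vis j 1) res p1 p2 [] hlen1 (by simp) hin
        have hmle : m ≤ fuel := by
          have h1 : (PySem.List.pyGetD g j []).length ≤ E := hE j
          have h2 : ((PySem.List.pySetD vis j 1).count 0 - p1.count 0) ≤ K := by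
            have := List.count_le_length (a := (0 : Int)) (l := PySem.List.pySetD vis j 1)
            omega
          have h3 : ((PySem.List.pySetD vis j 1).count 0 - p1.count 0) * (E + 2)
              ≤ K * (E + 2) := Nat.mul_le_mul_right _ h2
          omega
        have hrun := pvRun_of_steps g m _ _ hm rfl fuel hmle
        rw [if_pos hguard, if_neg (by simp [hguard])]
        simp only [hvr, hrun, pvDone]
        subst hp1
        subst hp2
        exact ih (j + 1) p1 (p2 ++ [j]) (by omega) (by omega) hlp
    · rw [if_neg hguard, if_pos hguard]
      exact ih (j + 1) vis res (by omega) (by omega) hlen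

-- ===== VERDICT (by name: the statement is the Claim_ definition above) =====
theorem find_ordering_spec : Claim_equal_find_ordering := by
  intro k n l _hdom hpre
  unfold Spec_find_ordering
  unfold find_ordering find_ordering_alt
  rw [← pvBuild_eq k n l hpre.1]
  obtain ⟨hinv, hlen⟩ := pvABuild_inv k n l hpre
  have hmain := pvMainLoop (pvABuild k n l) k.toNat ((pvABuild k n l).map List.length).sum
    ((k.toNat + 1) * (((pvABuild k n l).map List.length).sum + 2)
      + ((pvABuild k n l).map List.length).sum + 2) k hinv rfl
    (fun i => pvGetD_len_le (pvABuild k n l) i)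
    (by
      have h := Nat.mul_le_mul_right (((pvABuild k n l).map List.length).sum + 2)
        (by omega : k.toNat ≤ k.toNat + 1)
      omega)
    k.toNat 0 (List.replicate k.toNat 0) [] le_rfl (by omega) (by simp)
  unfold pvALoop pvBLoop
  rw [hmain]
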